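-- pv_equiv track=rewrite | github.com/whoschek/bzfs | bzfs_main/utils.py | dataset_paths
-- ===== SOURCE A (Python) =====
-- from typing import (
--     IO,
--     Any,
--     Callable,
--     Final,
--     Generic,
--     ItemsView,
--     Iterable,
--     Iterator,
--     List,
--     NoReturn,
--     Protocol,
--     Sequence,
--     TextIO,
--     Tuple,
--     TypeVar,
--     cast,
-- )
--
-- def dataset_paths(dataset: str) -> Iterator[str]:
--     """Enumerates all paths of a valid ZFS dataset name; Example: "a/b/c" --> yields "a", "a/b", "a/b/c"."""
--     i: int = 0
--     while i >= 0:
--         i = dataset.find("/", i)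
--         if i < 0:
--             yield dataset
--         else:
--             yield dataset[:i]
--             i += 1
-- ===== SOURCE B (Python) =====
-- def dataset_paths(dataset: str):
--     """Enumerates all paths of a valid ZFS dataset name; Example: "a/b/c" --> yields "a", "a/b", "a/b/c"."""
--     parts = dataset.split("/")
--     for i in range(len(parts)):
--         yield "/".join(parts[: i + 1])
-- ===== Notes on version B (the rewrite author's own statement) =====
-- stated objective: idiomatic
-- what changed: B tokenizes the name once with split('/') and reassembles each prefix with join over the growing token slice, instead of A's cursor loop that repeatedly calls str.find for the next separator and slices the raw string at the found index.
import Mathlib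
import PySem

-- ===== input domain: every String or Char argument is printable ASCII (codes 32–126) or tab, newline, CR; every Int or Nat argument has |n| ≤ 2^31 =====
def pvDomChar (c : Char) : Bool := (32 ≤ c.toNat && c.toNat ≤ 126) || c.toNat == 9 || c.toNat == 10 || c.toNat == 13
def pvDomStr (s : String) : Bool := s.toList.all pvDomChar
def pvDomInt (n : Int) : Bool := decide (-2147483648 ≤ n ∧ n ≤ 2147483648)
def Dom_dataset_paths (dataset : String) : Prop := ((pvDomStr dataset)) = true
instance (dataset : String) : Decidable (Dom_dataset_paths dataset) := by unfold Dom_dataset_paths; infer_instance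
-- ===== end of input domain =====

-- B re-implements A idiomatically: split once into tokens and join growing token slices,
-- instead of A's find-cursor loop over separator indices; equivalence (return values) is proved below.

-- ===== PORT A =====
-- bounds of a successful findFrom: needed only for termination of the loop below
theorem pv_findFrom_bounds (s : List Char) (i : Nat)
    (h : ¬ PySem.Chars.findFrom s ['/'] (i : Int) none < 0) :
    (i : Int) ≤ PySem.Chars.findFrom s ['/'] (i : Int) none ∧
    (PySem.Chars.findFrom s ['/'] (i : Int) none).toNat < s.length := by
  by_cases hi : i ≤ s.length
  · rw [PySem.Chars.findFrom_natCast s ['/'] i hi] at h ⊢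
    by_cases hf : PySem.Chars.find (s.drop i) ['/'] = -1
    · simp [hf] at h
    · rw [if_neg hf]
      have h0 : (0:Int) ≤ PySem.Chars.find (s.drop i) ['/'] := by
        have := PySem.Chars.neg_one_le_find (s.drop i) ['/']
        omega
      have hspec := (PySem.Chars.find_spec (s := s.drop i) (sub := ['/']) h0).1
      have hlt : (PySem.Chars.find (s.drop i) ['/']).toNat < (s.drop i).length := by
        rcases hspec with ⟨t, ht⟩
        have hne : (s.drop i).drop (PySem.Chars.find (s.drop i) ['/']).toNat ≠ [] := by
          rw [← ht]; simp
        rw [ne_eq, List.drop_eq_nil_iff] at hne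
        omega
      simp only [List.length_drop] at hlt
      constructor
      · omega
      · omega
  · exfalso
    apply h
    have h1 : ¬ ((i : Int) < 0) := by omega
    have h2 : ((s.length : Int)) < (i : Int) := by
      have : s.length < i := by omega
      exact_mod_cast this
    simp [PySem.Chars.findFrom, h1, h2]

-- the while-loop of A: i = dataset.find("/", i); yield dataset / dataset[:i]; i += 1
def pvDpGoA (s : List Char) (i : Nat) : List (List Char) :=
  if h : PySem.Chars.findFrom s ['/'] (i : Int) none < 0 then [s]
  else PySem.Chars.slice s none (some (PySem.Chars.findFrom s ['/'] (i : Int) none)) ::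
    pvDpGoA s ((PySem.Chars.findFrom s ['/'] (i : Int) none).toNat + 1)
termination_by s.length + 1 - i
decreasing_by
  have := pv_findFrom_bounds s i h
  omega

def dataset_paths (dataset : String) : List String :=
  (pvDpGoA dataset.toList 0).map String.mk

-- ===== PORT B =====
def dataset_paths_alt (dataset : String) : List String :=
  let parts := PySem.Chars.splitOn dataset.toList ['/']
  (List.range parts.length).map (fun i => String.mk (PySem.Chars.join ['/'] (parts.take (i + 1))))

-- ===== PRECONDITION & SPEC =====
def Spec_dataset_paths (dataset : String) (out : List String) : Prop := out = dataset_paths_alt dataset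
instance (dataset : String) (out : List String) : Decidable (Spec_dataset_paths dataset out) := by unfold Spec_dataset_paths; infer_instance

-- ===== CLAIM (what is proved, stated in full; the proofs are below) =====
def Claim_equal_dataset_paths : Prop := ∀ (dataset : String), Dom_dataset_paths dataset → Spec_dataset_paths dataset (dataset_paths dataset)

-- ===== LEMMAS AND PROOFS =====

-- reference splitter: s.split("/") as structural recursion
def pvSp1 : List Char → List (List Char)
  | [] => [[]]
  | x :: xs => if x = '/' then [] :: pvSp1 xs else (x :: (pvSp1 xs).headI) :: (pvSp1 xs).tail

-- reference prefix-path builder over a token list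
def pvPaths (pre : List Char) : List (List Char) → List (List Char)
  | [] => []
  | t :: ts => (pre ++ t) :: pvPaths (pre ++ t ++ ['/']) ts

theorem pvSp1_ne_nil (cs : List Char) : pvSp1 cs ≠ [] := by
  cases cs with
  | nil => simp [pvSp1]
  | cons x xs =>
    simp only [pvSp1]
    split <;> simp

theorem pvSp1_no_slash (cs : List Char) (h : '/' ∉ cs) : pvSp1 cs = [cs] := by
  induction cs with
  | nil => rfl
  | cons x xs ih =>
    simp only [List.mem_cons, not_or] at h
    have hx : ¬ x = '/' := fun hh => h.1 hh.symm
    simp [pvSp1, hx, ih h.2, List.headI]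

theorem pvSp1_split (a b : List Char) (h : '/' ∉ a) :
    pvSp1 (a ++ '/' :: b) = a :: pvSp1 b := by
  induction a with
  | nil => simp [pvSp1]
  | cons x xs ih =>
    simp only [List.mem_cons, not_or] at h
    have hx : ¬ x = '/' := fun hh => h.1 hh.symm
    simp [pvSp1, hx, ih h.2]

-- head-merge helper for the splitOn accumulator proof
def pvConsHead (p : List Char) : List (List Char) → List (List Char)
  | [] => [p]
  | t :: ts => (p ++ t) :: ts

theorem pv_go_spec : ∀ (fuel : Nat) (l cur : List Char) (acc : List (List Char)),
    l.length < fuel →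
    PySem.Chars.splitOn.go ['/'] fuel l cur acc = acc.reverse ++ pvConsHead cur.reverse (pvSp1 l) := by
  intro fuel
  induction fuel with
  | zero => intro l cur acc h; omega
  | succ fuel ih =>
    intro l cur acc h
    cases l with
    | nil => simp [PySem.Chars.splitOn.go, pvSp1, pvConsHead]
    | cons x rest =>
      by_cases hx : x = '/'
      · subst hx
        rw [show PySem.Chars.splitOn.go ['/'] (fuel + 1) ('/' :: rest) cur acc
              = PySem.Chars.splitOn.go ['/'] fuel rest [] (cur.reverse :: acc) by
            simp [PySem.Chars.splitOn.go]]
        rw [ih rest [] (cur.reverse :: acc) (by simp at h; omega)]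
        rcases hne : pvSp1 rest with _ | ⟨t, ts⟩
        · exact absurd hne (pvSp1_ne_nil rest)
        · simp [pvSp1, pvConsHead, hne]
      · rw [show PySem.Chars.splitOn.go ['/'] (fuel + 1) (x :: rest) cur acc
              = PySem.Chars.splitOn.go ['/'] fuel rest (x :: cur) acc by
            simp only [PySem.Chars.splitOn.go, List.isPrefixOf]
            split
            · next hp =>
                simp at hp
                exact absurd hp.symm hx
            · rfl]
        rw [ih rest (x :: cur) acc (by simp at h; omega)]
        rcases hne : pvSp1 rest with _ | ⟨t, ts⟩
        · exact absurd hne (pvSp1_ne_nil rest)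
        · simp [pvSp1, pvConsHead, hne, hx, List.headI]

theorem pv_splitOn_eq (s : List Char) : PySem.Chars.splitOn s ['/'] = pvSp1 s := by
  unfold PySem.Chars.splitOn
  rw [pv_go_spec (s.length + 1) s [] [] (by omega)]
  rcases hne : pvSp1 s with _ | ⟨t, ts⟩
  · exact absurd hne (pvSp1_ne_nil s)
  · simp [pvConsHead]

theorem pvPaths_eq_joins : ∀ (ts : List (List Char)), ts ≠ [] → ∀ (pre : List Char),
    (List.range ts.length).map (fun i => pre ++ PySem.Chars.join ['/'] (ts.take (i + 1)))
      = pvPaths pre ts := by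
  intro ts
  induction ts with
  | nil => intro h; exact absurd rfl h
  | cons t ts ih =>
    intro _ pre
    rw [List.length_cons, List.range_succ_eq_map, List.map_cons, List.map_map]
    cases ts with
    | nil => simp [pvPaths, PySem.Chars.join_singleton]
    | cons u rest =>
      rw [pvPaths]
      congr 1
      · simp [PySem.Chars.join_singleton]
      · rw [← ih (by simp) (pre ++ t ++ ['/'])]
        apply List.map_congr_left
        intro i hi
        simp only [Function.comp_apply, Nat.succ_eq_add_one, List.take_succ_cons,
          PySem.Chars.join_cons_cons, List.append_assoc]

theorem pvDpGoA_eq (s : List Char) (i : Nat) (hi : i ≤ s.length) :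
    pvDpGoA s i = pvPaths (s.take i) (pvSp1 (s.drop i)) := by
  rw [pvDpGoA]
  by_cases hneg : PySem.Chars.findFrom s ['/'] (i : Int) none < 0
  · rw [dif_pos hneg]
    rw [PySem.Chars.findFrom_natCast s ['/'] i hi] at hneg
    have hfind : PySem.Chars.find (s.drop i) ['/'] = -1 := by
      by_contra hf
      rw [if_neg hf] at hneg
      have := PySem.Chars.neg_one_le_find (s.drop i) ['/']
      omega
    have hnm : '/' ∉ s.drop i := by
      intro hm
      have hinf : ['/'] <:+: s.drop i := by
        rcases List.append_of_mem hm with ⟨l1, l2, hb⟩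
        exact ⟨l1, l2, by simp [hb]⟩
      exact ((PySem.Chars.find_eq_neg_one_iff _ _).mp hfind) hinf
    rw [pvSp1_no_slash _ hnm, pvPaths, pvPaths, List.take_append_drop]
  · rw [dif_neg hneg]
    have hb := pv_findFrom_bounds s i hneg
    rw [PySem.Chars.findFrom_natCast s ['/'] i hi] at hneg hb ⊢
    have hf : PySem.Chars.find (s.drop i) ['/'] ≠ -1 := by
      intro hf
      rw [if_pos hf] at hneg
      exact hneg (by norm_num)
    rw [if_neg hf] at hneg hb ⊢
    set r := PySem.Chars.find (s.drop i) ['/'] with hr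
    have h0 : (0:Int) ≤ r := by
      have := PySem.Chars.neg_one_le_find (s.drop i) ['/']
      omega
    obtain ⟨hpre, hmin⟩ := PySem.Chars.find_spec (s := s.drop i) (sub := ['/']) h0
    set rn := r.toNat with hrn
    have hjnat : ((i : Int) + r).toNat = i + rn := by omega
    have hrlt : rn < (s.drop i).length := by
      have h2 := hb.2
      rw [hjnat] at h2
      simp only [List.length_drop]
      omega
    have hdropr : (s.drop i).drop rn = '/' :: (s.drop i).drop (rn + 1) := by
      rcases hpre with ⟨t, ht⟩
      have htail : t = (s.drop i).drop (rn + 1) := by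
        have h3 := congrArg List.tail ht
        simpa [List.tail_drop] using h3
      rw [← ht, htail]
      simp
    have hd : s.drop i = (s.drop i).take rn ++ '/' :: (s.drop i).drop (rn + 1) := by
      conv_lhs => rw [← List.take_append_drop rn (s.drop i)]
      rw [hdropr]
    have hnm : '/' ∉ (s.drop i).take rn := by
      intro hm
      rw [List.mem_take_iff_getElem] at hm
      rcases hm with ⟨k, hk, hgk⟩
      have hkr : k < rn := lt_of_lt_of_le hk (by omega)
      have hklen : k < (s.drop i).length := by omega
      apply hmin k hkr
      refine ⟨(s.drop i).drop (k + 1), ?_⟩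
      rw [List.drop_eq_getElem_cons hklen, hgk]
      simp
    conv_rhs => rw [hd]
    rw [pvSp1_split _ _ hnm, pvPaths]
    have hlena : ((s.drop i).take rn).length = rn := by
      simp [List.length_take]
      omega
    have htakern1 : (s.drop i).take (rn + 1) = (s.drop i).take rn ++ ['/'] := by
      have h1 : (s.drop i).take rn ++ ['/']
          = ((s.drop i).take rn ++ '/' :: (s.drop i).drop (rn + 1)).take (rn + 1) := by
        rw [show rn + 1 = ((s.drop i).take rn).length + 1 by rw [hlena]]
        rw [List.take_append]
        simp
      rw [h1, ← hd]
    congr 1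
    · rw [PySem.Chars.slice_eq_listSlice, PySem.List.slice_to, hjnat, List.take_add]
      omega
    · have hrec := pvDpGoA_eq s (((i : Int) + r).toNat + 1)
        (by rw [hjnat]; simp only [List.length_drop] at hrlt; omega)
      rw [hjnat] at hrec
      rw [hjnat, hrec]
      congr 1
      · rw [show i + rn + 1 = i + (rn + 1) by omega, List.take_add, htakern1]
        simp [List.append_assoc]
      · have hdd : List.drop (rn + 1) (List.drop i s) = List.drop (i + rn + 1) s := by
          rw [List.drop_drop]
          congr 1
        rw [hdd]
termination_by s.length + 1 - i
decreasing_by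
  rw [hjnat]
  simp only [List.length_drop] at hrlt
  omega

-- ===== VERDICT (by name: the statement is the Claim_ definition above) =====
theorem dataset_paths_spec : Claim_equal_dataset_paths := by
  intro dataset _
  unfold Spec_dataset_paths dataset_paths dataset_paths_alt
  simp only [pv_splitOn_eq]
  rw [pvDpGoA_eq dataset.toList 0 (Nat.zero_le _)]
  simp only [List.take_zero, List.drop_zero]
  rw [← pvPaths_eq_joins (pvSp1 dataset.toList) (pvSp1_ne_nil _) []]
  simp [List.map_map]
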